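-- pv_equiv track=rewrite | github.com/Kerorogunso/regex-fractal-cuda | cuda_regex_fractal.py | get_grid_string
-- ===== SOURCE A (Python) =====
-- def get_grid_string(n, i, j):
--     result =  ''
--     currentCentre = complex(2**(n-1), 2**(n-1))
--     for k in range(n):
--         if i >= currentCentre.real and j >= currentCentre.imag:
--             result += '1'
--             currentCentre += complex(2 ** (n - 2 - k)) * complex(1, 1)
--         elif i < currentCentre.real and j >= currentCentre.imag:
--             result += '2'
--             currentCentre += complex(2 ** (n - 2 - k)) * complex(-1, 1)
--         elif i >= currentCentre.real and j < currentCentre.imag: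
--             result += '3'
--             currentCentre += complex(2 ** (n - 2 - k)) * complex(1, -1)
--         else:
--             result += '4'
--             currentCentre += complex(2 ** (n - 2 - k)) * complex(-1, -1)
--
--     return result
-- ===== SOURCE B (Python) =====
-- def get_grid_string(n, i, j):
--     # Closed form: digit k is read directly from bit (n-1-k) of the clamped
--     # coordinates; no sequential narrowing of a centre is performed.
--     if n <= 0:
--         return ''
--     top = (1 << n) - 1
--     ci = min(max(i, 0), top)
--     cj = min(max(j, 0), top)
--     digits = []
--     for k in range(n - 1, -1, -1):
--         bit_i = (ci >> k) & 1
--         bit_j = (cj >> k) & 1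
--         digits.append("4321"[bit_i + 2 * bit_j])
--     return ''.join(digits)
-- ===== Notes on version B (the rewrite author's own statement) =====
-- stated objective: alternative
-- what changed: A sequentially narrows a complex centre with a four-way branch per step; B is a closed form: it clamps each coordinate into [0, 2^n-1] once and reads digit k directly as bit (n-1-k) of the two clamped coordinates, with no narrowing loop or centre state.
import Mathlib
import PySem

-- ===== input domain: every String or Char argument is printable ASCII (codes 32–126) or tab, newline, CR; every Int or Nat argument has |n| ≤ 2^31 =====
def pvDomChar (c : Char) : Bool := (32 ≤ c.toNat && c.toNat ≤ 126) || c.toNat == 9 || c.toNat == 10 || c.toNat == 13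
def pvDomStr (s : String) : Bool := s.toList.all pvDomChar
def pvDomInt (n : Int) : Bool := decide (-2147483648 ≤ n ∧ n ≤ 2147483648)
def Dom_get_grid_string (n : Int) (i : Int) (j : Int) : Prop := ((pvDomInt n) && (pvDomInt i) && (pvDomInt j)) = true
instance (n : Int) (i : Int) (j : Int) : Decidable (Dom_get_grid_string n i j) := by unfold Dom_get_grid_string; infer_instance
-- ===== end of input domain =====

-- B replaces A's sequential centre-narrowing loop by a closed form: it clamps
-- each coordinate into [0, 2^n-1] and reads digit k directly as bit (n-1-k) of
-- the two clamped coordinates (objective: alternative; same O(n) digit count).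
--
-- FLOAT EXACTNESS NOTE (why the integer port of A is exact on Dom ∧ Pre_): all
-- float values arising in A are of the form odd·2^(n-1-k); while the centre
-- coordinate exceeds 2^32 > |i|,|j| it is a single power of two, and once it
-- drops below 2^32 it stays below 2^32 with smallest bit ≥ 2^-1, so every
-- value fits in ≤ 35 significant bits ≤ 53 and every float operation and
-- comparison is exact.  The port keeps the centre DOUBLED (×2) as an Int:
-- initial centre 2^(n-1) ↦ 2^n, step 2^(n-2-k) ↦ 2^(n-1-k).

-- ===== PORT A =====
-- one loop step of A; state = (result, 2*centre.real, 2*centre.imag)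
def pvStepA (i j n : Int) (st : List Char × Int × Int) (k : Int) : List Char × Int × Int :=
  let res := st.1
  let cr := st.2.1
  let ci := st.2.2
  let d : Int := 2 ^ ((n - 1 - k).toNat)   -- = 2 * 2^(n-2-k); exponent ≥ 0 for k < n
  if 2*i ≥ cr ∧ 2*j ≥ ci then (res ++ ['1'], cr + d, ci + d)
  else if 2*i < cr ∧ 2*j ≥ ci then (res ++ ['2'], cr - d, ci + d)
  else if 2*i ≥ cr ∧ 2*j < ci then (res ++ ['3'], cr + d, ci - d)
  else (res ++ ['4'], cr - d, ci - d)

def get_grid_string (n : Int) (i : Int) (j : Int) : String :=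
  -- 2^(n.toNat) = 2*2^(n-1) for n ≥ 1; for n ≤ 0 the range below is empty and
  -- the initial centre is never inspected
  String.ofList (((PySem.List.pyRange 0 n 1).foldl (pvStepA i j n)
    ([], 2 ^ n.toNat, 2 ^ n.toNat)).1)

-- ===== PORT B =====
-- Source B's loop body: digit for step k is "4321"[bit_i + 2*bit_j], where the
-- bits are (ci >> k) & 1 rendered as (ci / 2^k) % 2 (ci, cj ≥ 0 after clamp)
def pvDigitB (ci cj : Int) (k : Nat) : Char :=
  let bit_i : Int := (ci / 2 ^ k) % 2
  let bit_j : Int := (cj / 2 ^ k) % 2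
  ['4', '3', '2', '1'].getD (bit_i + 2 * bit_j).toNat ' '

def get_grid_string_alt (n : Int) (i : Int) (j : Int) : String :=
  if n ≤ 0 then "" else
  let top : Int := 2 ^ n.toNat - 1
  let ci := min (max i 0) top
  let cj := min (max j 0) top
  -- range(n-1, -1, -1) over k
  String.ofList ((List.range n.toNat).reverse.map (pvDigitB ci cj))

-- ===== PRECONDITION & SPEC =====
-- Pre_ excludes n ≥ 1025, where Python A raises OverflowError converting
-- 2**(n-1) to float in complex(); B returns the quadrant string there.
def Pre_get_grid_string (n : Int) (i : Int) (j : Int) : Prop := n ≤ 1024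
instance (n : Int) (i : Int) (j : Int) : Decidable (Pre_get_grid_string n i j) := by
  unfold Pre_get_grid_string; infer_instance

def pvWitness_get_grid_string : Int × Int × Int := (10, 3, 7)

def Spec_get_grid_string (n : Int) (i : Int) (j : Int) (out : String) : Prop := out = get_grid_string_alt n i j
instance (n : Int) (i : Int) (j : Int) (out : String) : Decidable (Spec_get_grid_string n i j out) := by unfold Spec_get_grid_string; infer_instance

-- ===== CLAIM (what is proved, stated in full; the proofs are below) =====
def Claim_equal_get_grid_string : Prop := ∀ (n : Int) (i : Int) (j : Int), Dom_get_grid_string n i j → Pre_get_grid_string n i j → Spec_get_grid_string n i j (get_grid_string n i j)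

-- ===== LEMMAS AND PROOFS =====

-- A's loop, rephrased per axis: m remaining steps, c = 2*centre-coordinate,
-- d = 2*current step; records the comparison outcomes of one coordinate
def pvAxisGo (x : Int) : Nat → Int → Int → List Bool
  | 0, _, _ => []
  | m+1, c, d =>
    let hi := decide (2*x ≥ c)
    hi :: pvAxisGo x m (if hi then c + d else c - d) (d / 2)

def pvDigit : Bool × Bool → Char
  | (true, true) => '1'
  | (false, true) => '2'
  | (true, false) => '3'
  | (false, false) => '4'

-- the d argument only matters from step 2 on: 2^m/2 may be fed as 2^(m-1)
lemma pvAxisGo_half (x : Int) (m : Nat) (c : Int) :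
    pvAxisGo x m c ((2:Int)^m / 2) = pvAxisGo x m c (2^(m-1)) := by
  cases m with
  | zero => simp [pvAxisGo]
  | succ m =>
    have h : ((2:Int)^(m+1)) / 2 = 2^m := by
      rw [pow_succ]; exact Int.mul_ediv_cancel _ (by norm_num)
    rw [h]; rfl

-- A's loop splits into the two independent axis tracks combined by pvDigit
lemma pv_main (i j n : Int) : ∀ (fuel : Nat) (res : List Char) (cr ci : Int),
    (fuel : Int) ≤ n →
    ((PySem.List.pyRange (n - fuel) n 1).foldl (pvStepA i j n) (res, cr, ci)).1
      = res ++ ((pvAxisGo i fuel cr (2^(fuel-1))).zip (pvAxisGo j fuel ci (2^(fuel-1)))).map pvDigit := by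
  intro fuel
  induction fuel with
  | zero =>
    intro res cr ci _
    simp [pvAxisGo]
  | succ m ih =>
    intro res cr ci hle
    have hlt : n - (m+1 : Nat) < n := by push_cast; omega
    have hk : n - (m+1 : Nat) + 1 = n - (m : Nat) := by push_cast; omega
    have hm : (m : Int) ≤ n := by push_cast at hle ⊢; omega
    have hB : ∀ (x : Int) (c : Int),
        pvAxisGo x (m+1) c (2^(m+1-1)) =
          decide (2*x ≥ c) :: pvAxisGo x m (if decide (2*x ≥ c) = true then c + 2^m else c - 2^m) (2^(m-1)) := by
      intro x c
      show (let hi := decide (2*x ≥ c);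
            hi :: pvAxisGo x m (if hi = true then c + 2^(m+1-1) else c - 2^(m+1-1)) (2^(m+1-1) / 2)) = _
      simp only [Nat.add_sub_cancel, pvAxisGo_half]
    rw [PySem.List.pyRange_one_cons hlt, List.foldl_cons, hB, hB, hk]
    by_cases hi : 2*i ≥ cr <;> by_cases hj : 2*j ≥ ci
    · rw [show pvStepA i j n (res, cr, ci) (n - ((m+1:Nat):Int)) = (res ++ ['1'], cr + 2^m, ci + 2^m) by
        simp [pvStepA, hi, hj]]
      rw [ih _ _ _ hm]; simp [hi, hj, pvDigit]
    · rw [show pvStepA i j n (res, cr, ci) (n - ((m+1:Nat):Int)) = (res ++ ['3'], cr + 2^m, ci - 2^m) by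
        simp [pvStepA, hi, hj]]
      rw [ih _ _ _ hm]; simp [hi, hj, pvDigit]
    · rw [show pvStepA i j n (res, cr, ci) (n - ((m+1:Nat):Int)) = (res ++ ['2'], cr - 2^m, ci + 2^m) by
        simp [pvStepA, hi, hj]]
      rw [ih _ _ _ hm]; simp [hi, hj, pvDigit]
    · rw [show pvStepA i j n (res, cr, ci) (n - ((m+1:Nat):Int)) = (res ++ ['4'], cr - 2^m, ci - 2^m) by
        simp [pvStepA, hi, hj]]
      rw [ih _ _ _ hm]; simp [hi, hj, pvDigit]

-- the clamp of x - b into [0, 2^m - 1]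
def pvClamp (x b : Int) (m : Nat) : Int := min (max (x - b) 0) (2^m - 1)

-- each axis track equals the bits of the clamped offset, most significant first
lemma pv_axis_bits (x : Int) : ∀ (m : Nat) (b : Int),
    pvAxisGo x m (2*b + 2^m) (2^(m-1))
      = (List.range m).reverse.map (fun k => decide (pvClamp x b m / 2^k % 2 = 1)) := by
  intro m
  induction m with
  | zero => intro b; simp [pvAxisGo]
  | succ m ih =>
    intro b
    have hpow : (0:Int) < 2^m := by positivity
    have hsucc : (2:Int)^(m+1) = 2*2^m := by ring
    have hhalf : ((2:Int)^(m+1)) / 2 = 2^m := by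
      rw [hsucc]; exact Int.mul_ediv_cancel_left _ (by norm_num)
    have hunf : pvAxisGo x (m+1) (2*b + 2^(m+1)) (2^(m+1-1)) =
        decide (2*x ≥ 2*b + 2^(m+1)) ::
          pvAxisGo x m (if decide (2*x ≥ 2*b + 2^(m+1)) = true
                        then 2*b + 2^(m+1) + 2^m else 2*b + 2^(m+1) - 2^m) (2^(m-1)) := by
      show (let hi := decide (2*x ≥ 2*b + 2^(m+1));
            hi :: pvAxisGo x m (if hi = true then 2*b + 2^(m+1) + 2^(m+1-1)
                                else 2*b + 2^(m+1) - 2^(m+1-1)) (2^(m+1-1) / 2)) = _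
      simp only [Nat.add_sub_cancel, hhalf, pvAxisGo_half]
    have hrange : (List.range (m+1)).reverse = m :: (List.range m).reverse := by
      rw [List.range_succ]; simp
    rw [hunf, hrange, List.map_cons]
    -- the clamped offset for the full (m+1)-step window
    set y := pvClamp x b (m+1) with hy
    have hy0 : 0 ≤ y ∧ y ≤ 2^(m+1) - 1 := by
      constructor <;> simp [hy, pvClamp] <;> omega
    -- head bit
    have hhead : decide (y / 2^m % 2 = 1) = decide (2*x ≥ 2*b + 2^(m+1)) := by
      by_cases hx : 2*x ≥ 2*b + 2^(m+1)
      · have hyge : 2^m ≤ y := by simp [hy, pvClamp]; omega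
        have hdiv : y / 2^m = 1 := by
          rw [show y = (y - 2^m) + 2^m * 1 by ring,
            Int.add_mul_ediv_left _ _ (by positivity : (2:Int)^m ≠ 0),
            Int.ediv_eq_zero_of_lt (by omega) (by omega)]
          norm_num
        simp [hdiv, hx]
      · have hylt : y < 2^m := by simp [hy, pvClamp]; omega
        have hdiv : y / 2^m = 0 := Int.ediv_eq_zero_of_lt hy0.1 hylt
        simp [hdiv, hx]
    by_cases hx : 2*x ≥ 2*b + 2^(m+1)
    · -- high half: recurse with base b + 2^m; clamped offset drops by 2^m
      have hd : decide (2*x ≥ 2*b + 2^(m+1)) = true := by simpa using hx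
      rw [hd, if_pos rfl,
        show 2*b + 2^(m+1) + 2^m = 2*(b + 2^m) + 2^m by ring, ih (b + 2^m)]
      set y' := pvClamp x (b + 2^m) m with hy'
      have hyy : y = y' + 2^m := by simp [hy, hy', pvClamp]; omega
      have hcong : ∀ k ∈ (List.range m).reverse,
          decide (y / 2^k % 2 = 1) = decide (y' / 2^k % 2 = 1) := by
        intro k hk
        have hkm : k < m := by simpa using hk
        have hsplit : (2:Int)^m = 2^k * (2 * 2^(m-k-1)) := by
          rw [← pow_succ', ← pow_add]
          congr 1
          omega
        have hstep : y / 2^k = y' / 2^k + 2 * 2^(m-k-1) := by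
          rw [hyy, hsplit, Int.add_mul_ediv_left _ _ (by positivity : (2:Int)^k ≠ 0)]
        rw [hstep, Int.add_mul_emod_self_left]
      refine congrArg₂ List.cons ?_ ?_
      · rw [hhead, hd]
      · exact (List.map_congr_left hcong).symm
    · -- low half: same base; the two clamps agree
      have hd : decide (2*x ≥ 2*b + 2^(m+1)) = false := by simpa using hx
      rw [hd, if_neg (by simp),
        show 2*b + 2^(m+1) - 2^m = 2*b + 2^m by ring, ih b]
      have hyy : y = pvClamp x b m := by simp [hy, pvClamp]; omega
      refine congrArg₂ List.cons ?_ ?_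
      · rw [hhead, hd]
      · rw [← hyy]

-- combining the two boolean tracks yields Source B's digits
lemma pv_zip_digit (ci cj : Int) (m : Nat) :
    (((List.range m).reverse.map (fun k => decide (ci / 2^k % 2 = 1))).zip
      ((List.range m).reverse.map (fun k => decide (cj / 2^k % 2 = 1)))).map pvDigit
    = (List.range m).reverse.map (pvDigitB ci cj) := by
  rw [List.zip_map', List.map_map]
  refine List.map_congr_left ?_
  intro k _
  have h2 : (0:Int) < 2^k := by positivity
  have hbi : ci / 2^k % 2 = 0 ∨ ci / 2^k % 2 = 1 := by omega
  have hbj : cj / 2^k % 2 = 0 ∨ cj / 2^k % 2 = 1 := by omega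
  rcases hbi with hbi | hbi <;> rcases hbj with hbj | hbj <;>
    simp [pvDigitB, pvDigit, hbi, hbj]

-- ===== VERDICT (by name: the statement is the Claim_ definition above) =====
theorem get_grid_string_spec : Claim_equal_get_grid_string := by
  intro n i j _ _
  unfold Spec_get_grid_string get_grid_string get_grid_string_alt
  by_cases hn : 0 < n
  · have hle : ¬ n ≤ 0 := by omega
    have h0 : n - (n.toNat : Int) = 0 := by omega
    have hmain := pv_main i j n n.toNat [] (2 ^ n.toNat) (2 ^ n.toNat) (by omega)
    rw [h0] at hmain
    have haxis : ∀ x : Int, pvAxisGo x n.toNat (2^n.toNat) (2^(n.toNat-1))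
        = (List.range n.toNat).reverse.map
            (fun k => decide ((min (max x 0) (2^n.toNat - 1)) / 2^k % 2 = 1)) := by
      intro x
      have h := pv_axis_bits x n.toNat 0
      simpa [pvClamp] using h
    rw [haxis i, haxis j] at hmain
    rw [if_neg hle]
    show String.ofList ((((PySem.List.pyRange 0 n 1).foldl (pvStepA i j n)
        ([], 2 ^ n.toNat, 2 ^ n.toNat)).1))
      = String.ofList ((List.range n.toNat).reverse.map
          (pvDigitB (min (max i 0) (2 ^ n.toNat - 1)) (min (max j 0) (2 ^ n.toNat - 1))))
    rw [hmain, List.nil_append, pv_zip_digit]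
  · have hm : n.toNat = 0 := by omega
    have hr : PySem.List.pyRange 0 n 1 = [] := by
      rw [PySem.List.pyRange_one]; simp; omega
    have hle : n ≤ 0 := by omega
    simp [hr, hm, hle]
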